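-- pv_equiv track=rewrite | github.com/mahmood726-cyber/shahzaib-icu-landscape | _test_review.py | _csv_safe
-- ===== SOURCE A (Python) =====
-- def _csv_safe(value):
--     if not value:
--         return value
--     if value[0] in ("=", "+", "@", "\t", "\r"):
--         return "'" + value
--     for prefix in ("\n=", "\n+", "\n@", "\r=", "\r+", "\r@"):
--         if prefix in value:
--             return "'" + value
--     return value
-- ===== SOURCE B (Python) =====
-- def _csv_safe(value):
--     if not value:
--         return value
--     risky = value[0] in "=+@\t\r"
--     if not risky:
--         prev = value[0]
--         for ch in value[1:]:
--             if prev in "\n\r" and ch in "=+@":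
--                 risky = True
--                 break
--             prev = ch
--     return "'" + value if risky else value
-- ===== Notes on version B (the rewrite author's own statement) =====
-- stated objective: alternative
-- what changed: Replaces the six independent substring searches with one linear scan over character pairs that tracks the previous character and sets a risky flag (with early break), keeping the first-char and empty guards.
import Mathlib
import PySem

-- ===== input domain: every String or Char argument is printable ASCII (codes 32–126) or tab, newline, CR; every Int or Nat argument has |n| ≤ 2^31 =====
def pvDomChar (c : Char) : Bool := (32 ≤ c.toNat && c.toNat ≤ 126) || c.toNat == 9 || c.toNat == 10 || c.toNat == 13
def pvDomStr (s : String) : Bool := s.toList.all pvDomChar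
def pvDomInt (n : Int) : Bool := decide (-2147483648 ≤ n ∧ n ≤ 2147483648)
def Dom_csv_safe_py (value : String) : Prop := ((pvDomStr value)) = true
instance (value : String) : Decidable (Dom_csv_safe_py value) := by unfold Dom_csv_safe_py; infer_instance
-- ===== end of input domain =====

-- B replaces A's six substring searches by one previous-character pair scan; same return value, no side effects.

-- ===== PORT A =====
-- literal port of A: empty guard, first-char membership, then the six 'prefix in value' tests in order
def csv_safe_py (value : String) : String :=
  match value.toList with
  | [] => value
  | c :: _ =>
    if c = '=' ∨ c = '+' ∨ c = '@' ∨ c = '\t' ∨ c = '\r' then "'" ++ value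
    else if PySem.Chars.isIn ['\n', '='] value.toList then "'" ++ value
    else if PySem.Chars.isIn ['\n', '+'] value.toList then "'" ++ value
    else if PySem.Chars.isIn ['\n', '@'] value.toList then "'" ++ value
    else if PySem.Chars.isIn ['\r', '='] value.toList then "'" ++ value
    else if PySem.Chars.isIn ['\r', '+'] value.toList then "'" ++ value
    else if PySem.Chars.isIn ['\r', '@'] value.toList then "'" ++ value
    else value

-- ===== PORT B =====
-- the pair scan of Source B: prev runs over the string, early true on a dangerous (prev, ch) pair
def csvAltScan : Char → List Char → Bool
  | _, [] => false
  | prev, ch :: rest =>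
    if (prev = '\n' || prev = '\r') && (ch = '=' || ch = '+' || ch = '@') then true
    else csvAltScan ch rest

def csv_safe_py_alt (value : String) : String :=
  match value.toList with
  | [] => value
  | c :: rest =>
    let risky := (c = '=' || c = '+' || c = '@' || c = '\t' || c = '\r') || csvAltScan c rest
    if risky then "'" ++ value else value

-- ===== PRECONDITION & SPEC =====
def Spec_csv_safe_py (value : String) (out : String) : Prop := out = csv_safe_py_alt value
instance (value : String) (out : String) : Decidable (Spec_csv_safe_py value out) := by unfold Spec_csv_safe_py; infer_instance

-- ===== CLAIM (what is proved, stated in full; the proofs are below) =====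
def Claim_equal_csv_safe_py : Prop := ∀ (value : String), Dom_csv_safe_py value → Spec_csv_safe_py value (csv_safe_py value)

-- ===== LEMMAS AND PROOFS =====

-- the pair scan finds exactly the six two-character infixes A searches for
lemma csvAltScan_iff : ∀ (rest : List Char) (c : Char),
    csvAltScan c rest = true ↔
      (['\n', '='] <:+: (c :: rest) ∨ ['\n', '+'] <:+: (c :: rest) ∨ ['\n', '@'] <:+: (c :: rest) ∨
       ['\r', '='] <:+: (c :: rest) ∨ ['\r', '+'] <:+: (c :: rest) ∨ ['\r', '@'] <:+: (c :: rest))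
  | [], c => by
    simp [csvAltScan, List.infix_cons_iff, List.cons_prefix_cons]
  | d :: rest', c => by
    rw [show csvAltScan c (d :: rest') =
      (if (c = '\n' || c = '\r') && (d = '=' || d = '+' || d = '@') then true
       else csvAltScan d rest') from rfl]
    split_ifs with h <;>
      simp only [Bool.and_eq_true, Bool.or_eq_true, decide_eq_true_eq] at h
    · refine iff_of_true rfl ?_
      have hinf : [c, d] <:+: (c :: d :: rest') := ⟨[], rest', rfl⟩
      obtain ⟨h1 | h1, (h2 | h2) | h2⟩ := h
      · exact Or.inl (h1 ▸ h2 ▸ hinf)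
      · exact Or.inr (Or.inl (h1 ▸ h2 ▸ hinf))
      · exact Or.inr (Or.inr (Or.inl (h1 ▸ h2 ▸ hinf)))
      · exact Or.inr (Or.inr (Or.inr (Or.inl (h1 ▸ h2 ▸ hinf))))
      · exact Or.inr (Or.inr (Or.inr (Or.inr (Or.inl (h1 ▸ h2 ▸ hinf)))))
      · exact Or.inr (Or.inr (Or.inr (Or.inr (Or.inr (h1 ▸ h2 ▸ hinf)))))
    · rw [csvAltScan_iff rest' d]
      have hpre : ∀ a b : Char, [a, b] <+: (c :: d :: rest') → a = c ∧ b = d := by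
        intro a b hp
        rw [List.cons_prefix_cons] at hp
        exact ⟨hp.1, (List.cons_prefix_cons.mp hp.2).1⟩
      constructor
      · rintro (h6 | h6 | h6 | h6 | h6 | h6)
        · exact Or.inl (List.infix_cons h6)
        · exact Or.inr (Or.inl (List.infix_cons h6))
        · exact Or.inr (Or.inr (Or.inl (List.infix_cons h6)))
        · exact Or.inr (Or.inr (Or.inr (Or.inl (List.infix_cons h6))))
        · exact Or.inr (Or.inr (Or.inr (Or.inr (Or.inl (List.infix_cons h6)))))
        · exact Or.inr (Or.inr (Or.inr (Or.inr (Or.inr (List.infix_cons h6)))))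
      · rintro (h6 | h6 | h6 | h6 | h6 | h6) <;>
        · rcases List.infix_cons_iff.mp h6 with hp | hi
          · obtain ⟨ha, hb⟩ := hpre _ _ hp
            exact absurd ⟨by simp [← ha], by simp [← hb]⟩ h
          · tauto

-- ===== VERDICT (by name: the statement is the Claim_ definition above) =====
theorem csv_safe_py_spec : Claim_equal_csv_safe_py := by
  intro value _
  unfold Spec_csv_safe_py csv_safe_py csv_safe_py_alt
  rcases h : value.toList with _ | ⟨c, rest⟩
  · rfl
  · simp only []
    by_cases hc : c = '=' ∨ c = '+' ∨ c = '@' ∨ c = '\t' ∨ c = '\r'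
    · rw [if_pos hc]
      have hb : (c = '=' || c = '+' || c = '@' || c = '\t' || c = '\r') = true := by
        simp only [Bool.or_eq_true, decide_eq_true_eq]; tauto
      simp [hb]
    · rw [if_neg hc]
      have hcf : (c = '=' || c = '+' || c = '@' || c = '\t' || c = '\r') = false := by
        simp only [Bool.or_eq_false_iff, decide_eq_false_iff_not]; tauto
      simp only [hcf, Bool.false_or]
      by_cases hs : csvAltScan c rest = true
      · rw [if_pos hs]
        have h6 := (csvAltScan_iff rest c).mp hs
        split_ifs with p1 p2 p3 p4 p5 p6 <;> try rfl
        exfalso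
        simp only [PySem.Chars.isIn_iff_infix] at p1 p2 p3 p4 p5 p6
        tauto
      · rw [if_neg hs]
        have hnot := (csvAltScan_iff rest c).not.mp hs
        simp only [not_or] at hnot
        obtain ⟨n1, n2, n3, n4, n5, n6⟩ := hnot
        have p1 : PySem.Chars.isIn ['\n', '='] (c :: rest) = false :=
          (PySem.Chars.isIn_eq_false_iff _ _).mpr n1
        have p2 : PySem.Chars.isIn ['\n', '+'] (c :: rest) = false :=
          (PySem.Chars.isIn_eq_false_iff _ _).mpr n2
        have p3 : PySem.Chars.isIn ['\n', '@'] (c :: rest) = false :=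
          (PySem.Chars.isIn_eq_false_iff _ _).mpr n3
        have p4 : PySem.Chars.isIn ['\r', '='] (c :: rest) = false :=
          (PySem.Chars.isIn_eq_false_iff _ _).mpr n4
        have p5 : PySem.Chars.isIn ['\r', '+'] (c :: rest) = false :=
          (PySem.Chars.isIn_eq_false_iff _ _).mpr n5
        have p6 : PySem.Chars.isIn ['\r', '@'] (c :: rest) = false :=
          (PySem.Chars.isIn_eq_false_iff _ _).mpr n6
        simp [p1, p2, p3, p4, p5, p6]
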